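-- pv_equiv track=rewrite | github.com/ABBoyangCD/exercise | voting.py | STVAuxiliaryFun
-- ===== SOURCE A (Python) =====
-- def STVAuxiliaryFun(dict):
--     """
--     This is a auxiliary function
--     that completes the iterative process of the main function
--     When the maximum value equals the minimum value, end the iteration
--     """
--     alternatives = list(dict.keys())
--     maxValue = max(dict.values())
--     minValue = min(dict.values())
--     if maxValue != minValue:
--         for i in alternatives:
--             if dict[i] == minValue:
--                 del dict[i]
--                 alternatives.remove(i)
--         return STVAuxiliaryFun(dict)
--     else:
--         return dict
-- ===== SOURCE B (Python) =====
-- def STVAuxiliaryFun(dict):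
--     """Keep only the keys holding the maximum value: one pass instead of
--     repeatedly peeling off the minimum.  Mutates and returns the same dict."""
--     m = max(dict.values())
--     for k in list(dict.keys()):
--         if dict[k] != m:
--             del dict[k]
--     return dict
-- ===== Notes on version B (the rewrite author's own statement) =====
-- stated objective: faster
-- what changed: Instead of recursively deleting all minimum-valued keys round after round until max == min, B computes the maximum once and deletes every key below it in a single pass over the keys (both mutate and return the dict they receive).
import Mathlib
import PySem

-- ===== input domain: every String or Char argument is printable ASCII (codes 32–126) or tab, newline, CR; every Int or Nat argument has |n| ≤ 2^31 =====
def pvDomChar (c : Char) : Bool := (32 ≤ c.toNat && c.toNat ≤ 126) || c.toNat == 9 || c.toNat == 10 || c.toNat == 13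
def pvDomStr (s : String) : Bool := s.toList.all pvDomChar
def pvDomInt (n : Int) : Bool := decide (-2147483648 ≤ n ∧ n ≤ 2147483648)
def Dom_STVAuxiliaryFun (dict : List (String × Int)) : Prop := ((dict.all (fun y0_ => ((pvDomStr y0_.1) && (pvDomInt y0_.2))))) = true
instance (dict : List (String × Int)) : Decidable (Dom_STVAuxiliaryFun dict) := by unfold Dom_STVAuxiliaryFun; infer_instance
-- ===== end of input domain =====

-- B computes max(dict.values()) once and deletes every lower-valued key in a single
-- pass, instead of A's recursive rounds of deleting the minimum; both mutate the
-- dict they receive and the equivalence proved here is about the return value.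


-- ===== PORT A =====

-- Python's 'for i in alternatives: if dict[i] == minValue: del dict[i]; alternatives.remove(i)':
-- the for statement walks the (mutated) list by an internal index, so removing the current
-- element makes the next one be skipped; modeled index-for-index.
def stvPass (alts : List String) (idx : Nat) (d : PySem.Dict String Int) (minV : Int) :
    PySem.Dict String Int :=
  if h : idx < alts.length then
    let i := alts[idx]
    match d.get? i with
    | none => d                       -- dict[i]: KeyError, unreachable (i is one of d's keys)
    | some v =>
      if v = minV then
        match halts : PySem.List.remove? alts i with
        | none => d                   -- alternatives.remove(i): ValueError, unreachable
        | some alts' => stvPass alts' (idx + 1) (d.erase i) minV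
      else stvPass alts (idx + 1) d minV
  else d
termination_by alts.length - idx
decreasing_by
  · have hmem : alts[idx] ∈ alts := List.getElem_mem h
    have : alts' = alts.erase alts[idx] := by
      have := PySem.List.remove?_eq_some_erase (xs := alts) (v := alts[idx]) hmem
      rw [halts] at this
      exact Option.some_inj.mp this
    have hlen := List.length_erase_of_mem hmem
    subst this; omega
  · omega

-- the recursive body of A; fuel = number of keys bounds the recursion depth
-- (each recursive call has strictly fewer keys); fuel 0 is unreachable from the entry point.
def stvCore : Nat → PySem.Dict String Int → PySem.Dict String Int
  | 0, d => d
  | fuel + 1, d =>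
    let alternatives := d.keys
    match PySem.List.max? d.values (fun x => x), PySem.List.min? d.values (fun x => x) with
    | some maxValue, some minValue =>
      if maxValue ≠ minValue then
        stvCore fuel (stvPass alternatives 0 d minValue)
      else d
    | _, _ => d                       -- max()/min() of an empty dict: ValueError, excluded by Pre_

def STVAuxiliaryFun (dict : List (String × Int)) : List (String × Int) :=
  (stvCore dict.length (PySem.Dict.mk dict)).items

-- ===== PORT B =====
def STVAuxiliaryFun_alt (dict : List (String × Int)) : List (String × Int) :=
  let d0 := PySem.Dict.mk dict
  match PySem.List.max? d0.values (fun x => x) with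
  | none => dict                      -- max() of an empty dict: ValueError, excluded by Pre_
  | some m =>
    (d0.keys.foldl (fun d k =>
      match d.get? k with
      | some v => if v ≠ m then d.erase k else d
      | none => d) d0).items          -- dict[k]: KeyError, unreachable (k is one of d's keys)

-- ===== PRECONDITION & SPEC =====
-- Pre_ excludes (i) the empty dict, where A raises ValueError (max of an empty sequence),
-- and (ii) association lists with duplicate keys, which represent no Python dict at all
-- (a dict's keys are unique), so A is never run on them.
def Pre_STVAuxiliaryFun (dict : List (String × Int)) : Prop :=
  dict ≠ [] ∧ (dict.map (fun p => p.1)).Nodup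
instance (dict : List (String × Int)) : Decidable (Pre_STVAuxiliaryFun dict) := by
  unfold Pre_STVAuxiliaryFun; infer_instance

def pvWitness_STVAuxiliaryFun : (List (String × Int)) := [("a", 1), ("b", 2), ("c", 2)]

def Spec_STVAuxiliaryFun (dict : List (String × Int)) (out : List (String × Int)) : Prop :=
  out = STVAuxiliaryFun_alt dict
instance (dict : List (String × Int)) (out : List (String × Int)) :
    Decidable (Spec_STVAuxiliaryFun dict out) := by unfold Spec_STVAuxiliaryFun; infer_instance

-- ===== CLAIM =====
def Claim_equal_STVAuxiliaryFun : Prop :=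
  ∀ (dict : List (String × Int)), Dom_STVAuxiliaryFun dict → Pre_STVAuxiliaryFun dict →
    Spec_STVAuxiliaryFun dict (STVAuxiliaryFun dict)

-- ===== LEMMAS AND PROOFS =====

-- structural description of one pass of A's for-loop over the item list:
-- a deleted (minimum-valued) entry makes the following entry be skipped (kept unexamined).
def passL (m : Int) : List (String × Int) → List (String × Int)
  | [] => []
  | [x] => if x.2 = m then [] else [x]
  | x :: y :: rest => if x.2 = m then y :: passL m rest else x :: passL m (y :: rest)

theorem passL_length_le_aux (m : Int) (n : Nat) : ∀ l : List (String × Int),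
    l.length ≤ n → (passL m l).length ≤ l.length := by
  induction n with
  | zero =>
    intro l hl
    have : l = [] := List.eq_nil_of_length_eq_zero (Nat.le_zero.mp hl)
    subst this; simp [passL]
  | succ n ih =>
    intro l hl
    match l with
    | [] => simp [passL]
    | [x] => simp only [passL]; split_ifs <;> simp
    | x :: y :: rest =>
      have h1 := ih rest (by simp at hl; omega)
      have h2 := ih (y :: rest) (by simp at hl; simp; omega)
      simp only [passL]
      split_ifs <;> simp <;> [skip; simpa using h2] <;> omega

theorem passL_length_le (m : Int) (l : List (String × Int)) :
    (passL m l).length ≤ l.length :=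
  passL_length_le_aux m l.length l le_rfl

theorem passL_length_lt_aux (m : Int) (n : Nat) : ∀ l : List (String × Int),
    l.length ≤ n → l ≠ [] → (∃ p ∈ l, p.2 = m) → (passL m l).length < l.length := by
  induction n with
  | zero =>
    intro l hl hne _
    exact absurd (List.eq_nil_of_length_eq_zero (Nat.le_zero.mp hl)) hne
  | succ n ih =>
    intro l hl hne hex
    match l with
    | [] => simp at hne
    | [x] =>
      rcases hex with ⟨p, hp, hpm⟩
      simp at hp; subst hp
      simp [passL, if_pos hpm]
    | x :: y :: rest =>
      by_cases hx : x.2 = m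
      · have := passL_length_le m rest
        simp only [passL, if_pos hx]
        simp; omega
      · have : (passL m (y :: rest)).length < (y :: rest).length := by
          apply ih (y :: rest) (by simp at hl ⊢; omega) (by simp)
          rcases hex with ⟨p, hp, hpm⟩
          rcases List.mem_cons.mp hp with hp | hp
          · exact absurd (hp ▸ hpm) hx
          · exact ⟨p, hp, hpm⟩
        simp only [passL, if_neg hx]
        simpa using this

theorem passL_length_lt (m : Int) (l : List (String × Int)) (hne : l ≠ [])
    (hex : ∃ p ∈ l, p.2 = m) : (passL m l).length < l.length :=
  passL_length_lt_aux m l.length l le_rfl hne hex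

theorem passL_sublist_aux (m : Int) (n : Nat) : ∀ l : List (String × Int),
    l.length ≤ n → (passL m l).Sublist l := by
  induction n with
  | zero =>
    intro l hl
    have : l = [] := List.eq_nil_of_length_eq_zero (Nat.le_zero.mp hl)
    subst this; simp [passL]
  | succ n ih =>
    intro l hl
    match l with
    | [] => simp [passL]
    | [x] => simp only [passL]; split_ifs <;> simp
    | x :: y :: rest =>
      simp only [passL]
      split_ifs with hx
      · exact List.Sublist.cons x (List.Sublist.cons₂ y (ih rest (by simp at hl; omega)))
      · exact List.Sublist.cons₂ x (ih (y :: rest) (by simp at hl ⊢; omega))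

theorem passL_sublist (m : Int) (l : List (String × Int)) : (passL m l).Sublist l :=
  passL_sublist_aux m l.length l le_rfl

theorem passL_filter_aux (m c : Int) (hcm : c ≠ m) (n : Nat) : ∀ l : List (String × Int),
    l.length ≤ n →
    (passL m l).filter (fun p => p.2 = c) = l.filter (fun p => p.2 = c) := by
  induction n with
  | zero =>
    intro l hl
    have : l = [] := List.eq_nil_of_length_eq_zero (Nat.le_zero.mp hl)
    subst this; simp [passL]
  | succ n ih =>
    intro l hl
    match l with
    | [] => simp [passL]
    | [x] =>
      by_cases hx : x.2 = m
      · simp [passL, List.filter, hx, hcm.symm]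
      · simp [passL, if_neg hx]
    | x :: y :: rest =>
      by_cases hx : x.2 = m
      · simp only [passL, if_pos hx]
        rw [List.filter_cons, List.filter_cons, List.filter_cons,
          ih rest (by simp at hl; omega)]
        have : (decide (x.2 = c)) = false := by simp [hx, hcm.symm]
        simp [this]
      · simp only [passL, if_neg hx]
        rw [List.filter_cons, List.filter_cons, ih (y :: rest) (by simp at hl ⊢; omega)]

theorem passL_filter (m c : Int) (hcm : c ≠ m) (l : List (String × Int)) :
    (passL m l).filter (fun p => p.2 = c) = l.filter (fun p => p.2 = c) :=
  passL_filter_aux m c hcm l.length l le_rfl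

theorem passL_cons_ne (m : Int) (x : String × Int) (rest : List (String × Int))
    (hx : ¬ x.2 = m) : passL m (x :: rest) = x :: passL m rest := by
  cases rest <;> simp [passL, hx]

-- find the entry of a fresh key in an association list
theorem find?_key_append (k : String) (v : Int) (done rest : List (String × Int))
    (hk : k ∉ done.map (fun p => p.1)) :
    List.find? (fun p => p.1 == k) (done ++ (k, v) :: rest) = some (k, v) := by
  rw [List.find?_append]
  have h1 : List.find? (fun p => p.1 == k) done = none := by
    apply List.find?_eq_none.mpr
    intro x hx
    simp only [beq_iff_eq]
    intro hxk
    exact hk (List.mem_map.mpr ⟨x, hx, hxk⟩)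
  simp [h1]

-- deleting a fresh key from an association list removes exactly its entry
theorem filter_key_append (k : String) (v : Int) (done rest : List (String × Int))
    (h1 : k ∉ done.map (fun p => p.1)) (h2 : k ∉ rest.map (fun p => p.1)) :
    (done ++ (k, v) :: rest).filter (fun p => !(p.1 == k)) = done ++ rest := by
  rw [List.filter_append, List.filter_cons]
  have hd : done.filter (fun p => !(p.1 == k)) = done := by
    apply List.filter_eq_self.mpr
    intro x hx
    simp only [Bool.not_eq_eq_eq_not, Bool.not_true, beq_eq_false_iff_ne, ne_eq]
    intro hxk
    exact h1 (List.mem_map.mpr ⟨x, hx, hxk⟩)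
  have hr : rest.filter (fun p => !(p.1 == k)) = rest := by
    apply List.filter_eq_self.mpr
    intro x hx
    simp only [Bool.not_eq_eq_eq_not, Bool.not_true, beq_eq_false_iff_ne, ne_eq]
    intro hxk
    exact h2 (List.mem_map.mpr ⟨x, hx, hxk⟩)
  simp [hd, hr]

theorem stvPass_eq_aux (m : Int) (n : Nat) : ∀ (rest done : List (String × Int)),
    rest.length ≤ n → ((done ++ rest).map (fun p => p.1)).Nodup →
    stvPass ((done ++ rest).map (fun p => p.1)) done.length (PySem.Dict.mk (done ++ rest)) m
      = PySem.Dict.mk (done ++ passL m rest) := by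
  induction n with
  | zero =>
    intro rest done hlen _
    have : rest = [] := List.eq_nil_of_length_eq_zero (Nat.le_zero.mp hlen)
    subst this
    rw [stvPass]
    simp [passL]
  | succ n ih =>
    intro rest done hlen hnd
    match rest with
    | [] =>
      rw [stvPass]; simp [passL]
    | (k, v) :: rtail =>
      have hnd2 := hnd
      rw [List.map_append, List.nodup_append] at hnd2
      have hkdone : k ∉ done.map (fun p => p.1) := fun hmem =>
        hnd2.2.2 k hmem k (by simp) rfl
      have hkr : k ∉ rtail.map (fun p => p.1) := by
        have h2 := hnd2.2.1
        rw [List.map_cons, List.nodup_cons] at h2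
        exact h2.1
      have hidx : done.length < ((done ++ (k, v) :: rtail).map (fun p => p.1)).length := by
        simp
      have hget : ((done ++ (k, v) :: rtail).map (fun p => p.1))[done.length]'hidx = k := by
        have : ((done ++ (k, v) :: rtail).map (fun p => p.1))
            = done.map (fun p => p.1) ++ k :: rtail.map (fun p => p.1) := by simp
        simp only [this]
        rw [List.getElem_append_right (by simp)]
        simp
      have hfind : (PySem.Dict.mk (done ++ (k, v) :: rtail)).get? k = some v := by
        simp only [PySem.Dict.get?]
        rw [find?_key_append k v done rtail hkdone]
        rfl
      rw [stvPass]
      simp only [dif_pos hidx, hget, hfind]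
      by_cases hv : v = m
      · -- minimum-valued entry: delete it and skip the next key
        have hmem : k ∈ (done ++ (k, v) :: rtail).map (fun p => p.1) := by simp
        have hrem : PySem.List.remove? ((done ++ (k, v) :: rtail).map (fun p => p.1)) k
            = some ((done ++ rtail).map (fun p => p.1)) := by
          have h0 := PySem.List.remove?_eq_some_erase (xs :=
            (done ++ (k, v) :: rtail).map (fun p => p.1)) (v := k) hmem
          rw [h0]
          congr 1
          rw [List.map_append, List.map_cons, List.erase_append_right _ hkdone,
            List.erase_cons_head, List.map_append]
        have herase : (PySem.Dict.mk (done ++ (k, v) :: rtail)).erase k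
            = PySem.Dict.mk (done ++ rtail) := by
          simp only [PySem.Dict.erase]
          rw [filter_key_append k v done rtail hkdone hkr]
        simp only [if_pos hv, herase]
        split
        next heq =>
          rw [hget, hrem] at heq
          exact absurd heq (by simp)
        next alts' heq =>
          rw [hget, hrem] at heq
          obtain rfl : alts' = (done ++ rtail).map (fun p => p.1) :=
            (Option.some_inj.mp heq).symm
          rcases rtail with _ | ⟨y, rest2⟩
          · rw [stvPass]
            simp [passL, hv]
          · have hnd' : (((done ++ [y]) ++ rest2).map (fun p => p.1)).Nodup := by
              have hsub : (((done ++ [y]) ++ rest2).map (fun p => p.1)).Sublist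
                  ((done ++ (k, v) :: y :: rest2).map (fun p => p.1)) := by
                apply List.Sublist.map
                simp only [List.append_assoc, List.singleton_append]
                exact (List.Sublist.refl done).append
                  (List.Sublist.cons (k, v) (List.Sublist.refl _))
              exact hnd.sublist hsub
            have hlen2 : rest2.length ≤ n := by simp at hlen; omega
            have h := ih rest2 (done ++ [y]) hlen2 hnd'
            simp only [passL, if_pos hv]
            simp only [List.append_assoc, List.singleton_append, List.length_append,
              List.length_cons, List.length_nil, Nat.add_zero, List.map_append,
              List.map_cons] at h ⊢
            exact h
      · -- not the minimum: keep it and move on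
        rw [if_neg hv, passL_cons_ne m (k, v) rtail (by simpa using hv)]
        have hnd' : (((done ++ [(k, v)]) ++ rtail).map (fun p => p.1)).Nodup := by
          simpa using hnd
        have hlen2 : rtail.length ≤ n := by simp at hlen; omega
        have h := ih rtail (done ++ [(k, v)]) hlen2 hnd'
        simp only [List.append_assoc, List.singleton_append, List.length_append,
          List.length_cons, List.length_nil, Nat.add_zero, List.map_append,
          List.map_cons] at h ⊢
        exact h

theorem stvPass_eq (m : Int) (l : List (String × Int))
    (hnd : (l.map (fun p => p.1)).Nodup) :
    stvPass (l.map (fun p => p.1)) 0 (PySem.Dict.mk l) m = PySem.Dict.mk (passL m l) := by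
  have := stvPass_eq_aux m l.length l [] le_rfl (by simpa using hnd)
  simpa using this

theorem stvCore_eq (fuel : Nat) (l : List (String × Int)) (maxV : Int)
    (hnd : (l.map (fun p => p.1)).Nodup) (hne : l ≠ []) (hfuel : l.length ≤ fuel)
    (hmax : PySem.List.max? (l.map (fun p => p.2)) (fun x => x) = some maxV) :
    (stvCore fuel (PySem.Dict.mk l)).items = l.filter (fun p => p.2 = maxV) := by
  induction fuel generalizing l with
  | zero =>
    exact absurd (List.eq_nil_of_length_eq_zero (Nat.le_zero.mp hfuel)) hne
  | succ fuel ih =>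
    have hvne : l.map (fun p => p.2) ≠ [] := by simpa using hne
    obtain ⟨minV, hmin⟩ : ∃ mv, PySem.List.min? (l.map (fun p => p.2)) (fun x => x) = some mv := by
      rcases h : PySem.List.min? (l.map (fun p => p.2)) (fun x => x) with _ | mv
      · exact absurd ((PySem.List.min?_eq_none_iff _ _).mp h) hvne
      · exact ⟨mv, h⟩
    have hvals : (PySem.Dict.mk l).values = l.map (fun p => p.2) := rfl
    have hkeys : (PySem.Dict.mk l).keys = l.map (fun p => p.1) := rfl
    rw [stvCore]
    simp only [hvals, hkeys, hmax, hmin]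
    by_cases heq : maxV = minV
    · -- all values equal: the recursion stops and the whole dict is kept
      subst heq
      rw [if_neg (by simp)]
      have : l.filter (fun p => p.2 = maxV) = l := by
        apply List.filter_eq_self.mpr
        intro p hp
        have h1 := PySem.List.max?_isMax hmax p.2 (List.mem_map_of_mem hp)
        have h2 := PySem.List.min?_isMin hmin p.2 (List.mem_map_of_mem hp)
        simp only [decide_eq_true_eq]
        omega
      rw [this]
    · rw [if_pos heq]
      rw [stvPass_eq minV l hnd]
      set l' := passL minV l with hl'
      have hsub : l'.Sublist l := passL_sublist minV l
      have hnd' : (l'.map (fun p => p.1)).Nodup := hnd.sublist (hsub.map _)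
      have hfilter := passL_filter minV maxV heq l
      obtain ⟨p0, hp0mem, hp0v⟩ : ∃ p ∈ l, p.2 = maxV := by
        have := PySem.List.max?_mem hmax
        rcases List.mem_map.mp this with ⟨p, hp, hpv⟩
        exact ⟨p, hp, hpv⟩
      have hp0l' : p0 ∈ l' := by
        have : p0 ∈ l'.filter (fun p => p.2 = maxV) := by
          rw [hfilter]
          exact List.mem_filter.mpr ⟨hp0mem, by simp [hp0v]⟩
        exact (List.mem_filter.mp this).1
      have hne' : l' ≠ [] := List.ne_nil_of_mem hp0l'
      have hmax' : PySem.List.max? (l'.map (fun p => p.2)) (fun x => x) = some maxV := by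
        have hvne' : l'.map (fun p => p.2) ≠ [] := by simpa using hne'
        rcases h : PySem.List.max? (l'.map (fun p => p.2)) (fun x => x) with _ | m'
        · exact absurd ((PySem.List.max?_eq_none_iff _ _).mp h) hvne'
        · have hm'mem : m' ∈ l'.map (fun p => p.2) := PySem.List.max?_mem h
          have hm'l : m' ∈ l.map (fun p => p.2) := (hsub.map _).mem hm'mem
          have h1 : m' ≤ maxV := PySem.List.max?_isMax hmax m' hm'l
          have h2 : maxV ≤ m' := PySem.List.max?_isMax h maxV
            (List.mem_map.mpr ⟨p0, hp0l', hp0v⟩)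
          rw [h, le_antisymm h1 h2]
      obtain ⟨q0, hq0mem, hq0v⟩ : ∃ p ∈ l, p.2 = minV := by
        have := PySem.List.min?_mem hmin
        rcases List.mem_map.mp this with ⟨p, hp, hpv⟩
        exact ⟨p, hp, hpv⟩
      have hlt : l'.length < l.length := passL_length_lt minV l hne ⟨q0, hq0mem, hq0v⟩
      have hfuel' : l'.length ≤ fuel := by omega
      rw [ih l' hnd' hne' hfuel' hmax', hfilter]

theorem foldB_gen (m : Int) : ∀ (rest done : List (String × Int)),
    ((done ++ rest).map (fun p => p.1)).Nodup →
    ((rest.map (fun p => p.1)).foldl (fun d k =>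
      match d.get? k with
      | some v => if v ≠ m then d.erase k else d
      | none => d) (PySem.Dict.mk (done ++ rest)))
      = PySem.Dict.mk (done ++ rest.filter (fun p => p.2 = m)) := by
  intro rest
  induction rest with
  | nil => intro done _; simp
  | cons hd rtail ih =>
    intro done hnd
    obtain ⟨k, v⟩ := hd
    have hnd2 := hnd
    rw [List.map_append, List.nodup_append] at hnd2
    have hkdone : k ∉ done.map (fun p => p.1) := fun hmem =>
      hnd2.2.2 k hmem k (by simp) rfl
    have hkr : k ∉ rtail.map (fun p => p.1) := by
      have h2 := hnd2.2.1
      rw [List.map_cons, List.nodup_cons] at h2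
      exact h2.1
    have hget : (PySem.Dict.mk (done ++ (k, v) :: rtail)).get? k = some v := by
      simp only [PySem.Dict.get?]
      rw [find?_key_append k v done rtail hkdone]
      rfl
    simp only [List.map_cons, List.foldl_cons, hget]
    by_cases hv : v = m
    · -- maximum-valued entry: kept
      rw [if_neg (by simpa using hv)]
      have := ih (done ++ [(k, v)]) (by simpa using hnd)
      simp only [List.append_assoc, List.singleton_append] at this
      rw [this]
      simp [hv]
    · -- below the maximum: deleted
      rw [if_pos hv]
      have herase : (PySem.Dict.mk (done ++ (k, v) :: rtail)).erase k
          = PySem.Dict.mk (done ++ rtail) := by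
        simp only [PySem.Dict.erase]
        rw [filter_key_append k v done rtail hkdone hkr]
      rw [herase]
      have hnd' : ((done ++ rtail).map (fun p => p.1)).Nodup := by
        have hsub : ((done ++ rtail).map (fun p => p.1)).Sublist
            ((done ++ (k, v) :: rtail).map (fun p => p.1)) := by
          apply List.Sublist.map
          exact (List.Sublist.refl done).append (List.Sublist.cons (k, v) (List.Sublist.refl _))
        exact hnd.sublist hsub
      rw [ih done hnd']
      simp [hv]

theorem alt_eq (l : List (String × Int)) (maxV : Int)
    (hnd : (l.map (fun p => p.1)).Nodup)
    (hmax : PySem.List.max? (l.map (fun p => p.2)) (fun x => x) = some maxV) :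
    STVAuxiliaryFun_alt l = l.filter (fun p => p.2 = maxV) := by
  unfold STVAuxiliaryFun_alt
  have hvals : (PySem.Dict.mk l).values = l.map (fun p => p.2) := rfl
  simp only [hvals, hmax]
  have hkeys : (PySem.Dict.mk l).keys = l.map (fun p => p.1) := rfl
  rw [hkeys]
  have := foldB_gen maxV l [] (by simpa using hnd)
  simp only [List.nil_append] at this
  rw [this]

-- ===== VERDICT =====
theorem STVAuxiliaryFun_spec : Claim_equal_STVAuxiliaryFun := by
  intro dict _ hpre
  obtain ⟨hne, hnd⟩ := hpre
  have hvne : dict.map (fun p => p.2) ≠ [] := by simpa using hne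
  obtain ⟨maxV, hmax⟩ : ∃ m, PySem.List.max? (dict.map (fun p => p.2)) (fun x => x) = some m := by
    rcases h : PySem.List.max? (dict.map (fun p => p.2)) (fun x => x) with _ | m
    · exact absurd ((PySem.List.max?_eq_none_iff _ _).mp h) hvne
    · exact ⟨m, h⟩
  show STVAuxiliaryFun dict = STVAuxiliaryFun_alt dict
  rw [STVAuxiliaryFun, stvCore_eq dict.length dict maxV hnd hne le_rfl hmax,
      alt_eq dict maxV hnd hmax]
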